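-- pv_equiv track=rewrite | github.com/Legendary-Coder-GT/keycast | drill.py | synthesize_drill_text
-- ===== SOURCE A (Python) =====
-- from itertools import cycle
-- from typing import Iterable
--
-- def synthesize_drill_text(error_keys: Iterable[str], length: int = 400) -> str:
--     """Fallback generator: repeat weak keys in short, vowel-mixed fragments."""
--     keys = [k for k in error_keys if k.strip()]
--     if not keys:
--         return ""
--     vowels = "aeiou"
--     output = []
--     key_cycle = cycle(keys)
--     vowel_cycle = cycle(vowels)
--     spacer_cycle = cycle([" ", " ", "  "])
--     while len("".join(output)) < length:
--         key_char = next(key_cycle)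
--         frag = f"{key_char}{next(vowel_cycle)}{key_char}"
--         output.append(frag)
--         output.append(next(spacer_cycle))
--     return "".join(output)[:length].strip()
-- ===== SOURCE B (Python) =====
-- def synthesize_drill_text(error_keys, length=400):
--     """Build (at most) one repeating period of the key/vowel/spacer stream with a running
--     total, then tile it by repetition, slice to length and strip."""
--     keys = [k for k in error_keys if k.strip()]
--     if not keys:
--         return ""
--     if length <= 0:
--         return ""
--     vowels = "aeiou"
--     spacers = [" ", " ", "  "]
--     p = 15 * len(keys)  # common multiple of len(keys), 5 and 3: one full period of the stream
--     parts = []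
--     total = 0
--     i = 0
--     while i < p and total < length:
--         frag = keys[i % len(keys)] + vowels[i % 5] + keys[i % len(keys)] + spacers[i % 3]
--         parts.append(frag)
--         total += len(frag)
--         i += 1
--     period = "".join(parts)
--     if total >= length:
--         return period[:length].strip()
--     reps = length // total + 1
--     return (period * reps)[:length].strip()
-- ===== Notes on version B (the rewrite author's own statement) =====
-- stated objective: faster
-- what changed: A grows a fragment list, re-joining and re-measuring the entire output on every iteration until it is long enough; B builds at most one full repeating period of the key/vowel/spacer stream with a running length total, then tiles that period by repetition, slices to length and strips.
import Mathlib
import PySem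

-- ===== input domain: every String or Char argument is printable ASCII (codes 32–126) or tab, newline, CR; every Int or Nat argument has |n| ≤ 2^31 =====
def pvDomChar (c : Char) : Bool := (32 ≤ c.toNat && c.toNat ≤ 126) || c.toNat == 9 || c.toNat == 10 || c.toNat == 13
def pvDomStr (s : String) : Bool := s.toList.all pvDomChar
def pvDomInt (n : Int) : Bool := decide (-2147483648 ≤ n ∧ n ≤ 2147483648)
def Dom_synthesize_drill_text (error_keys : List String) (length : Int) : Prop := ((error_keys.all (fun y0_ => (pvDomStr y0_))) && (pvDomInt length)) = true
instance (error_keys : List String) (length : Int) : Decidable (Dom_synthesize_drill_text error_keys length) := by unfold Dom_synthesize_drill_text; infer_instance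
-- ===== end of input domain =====

-- B replaces A's quadratic grow-and-rejoin loop with building one fixed period of the
-- key/vowel/spacer stream and tiling it, then slicing and stripping (objective: faster).



-- ===== PORT A =====
-- A's grow-until-long-enough loop: three lockstep cycles, append frag+spacer while joined
-- output is shorter than `length`; accumulator kept as List Char (= the joined output).
def synthLoopA (keys : List (List Char)) (vowels : List Char) (spacers : List (List Char))
    (length : Int) (acc : List Char) (i j s : Nat) : List Char :=
  if (acc.length : Int) < length then
    let k := keys.getD (i % keys.length) []
    let frag := k ++ [vowels.getD (j % vowels.length) ' '] ++ k
    synthLoopA keys vowels spacers length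
      (acc ++ frag ++ spacers.getD (s % spacers.length) []) (i+1) (j+1) (s+1)
  else acc
termination_by (length - acc.length).toNat
decreasing_by
  rename_i h
  simp only [List.length_append, List.length_cons]
  omega

def synthesize_drill_text (error_keys : List String) (length : Int) : String :=
  let keys := error_keys.filter (fun k => PySem.Chars.strip k.toList ≠ [])
  if keys = [] then ""
  else
    let out := synthLoopA (keys.map String.toList) ['a','e','i','o','u']
        [[' '], [' '], [' ',' ']] length [] 0 0 0
    String.ofList (PySem.Chars.strip (PySem.List.slice out none (some length)))

-- ===== PORT B =====
-- B: build at most one full period of the stream with a running total (early stop once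
-- `length` is covered), then tile the period by repetition, slice, strip.
def synthBuildB (kcs : List (List Char)) (length : Int) (p : Nat) (i : Nat) (total : Int)
    (acc : List Char) : List Char × Int :=
  if i < p ∧ total < length then
    let frag := kcs.getD (i % kcs.length) [] ++ [['a','e','i','o','u'].getD (i % 5) ' ']
      ++ kcs.getD (i % kcs.length) [] ++ [[' '], [' '], [' ',' ']].getD (i % 3) []
    synthBuildB kcs length p (i+1) (total + frag.length) (acc ++ frag)
  else (acc, total)
termination_by p - i
decreasing_by omega

def synthesize_drill_text_alt (error_keys : List String) (length : Int) : String :=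
  let keys := error_keys.filter (fun k => PySem.Chars.strip k.toList ≠ [])
  if keys = [] then ""
  else if length ≤ 0 then ""
  else
    let kcs := keys.map String.toList
    let pt := synthBuildB kcs length (15 * kcs.length) 0 0 []
    if length ≤ pt.2 then
      String.ofList (PySem.Chars.strip (PySem.List.slice pt.1 none (some length)))
    else
      let reps := (PySem.Int.floordiv length pt.2).toNat + 1
      String.ofList (PySem.Chars.strip
        (PySem.List.slice (List.flatten (List.replicate reps pt.1)) none (some length)))

-- ===== PRECONDITION & SPEC =====
def Spec_synthesize_drill_text (error_keys : List String) (length : Int) (out : String) : Prop := out = synthesize_drill_text_alt error_keys length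
instance (error_keys : List String) (length : Int) (out : String) : Decidable (Spec_synthesize_drill_text error_keys length out) := by unfold Spec_synthesize_drill_text; infer_instance

-- ===== CLAIM (what is proved, stated in full; the proofs are below) =====
def Claim_equal_synthesize_drill_text : Prop := ∀ (error_keys : List String) (length : Int), Dom_synthesize_drill_text error_keys length → Spec_synthesize_drill_text error_keys length (synthesize_drill_text error_keys length)

-- ===== LEMMAS AND PROOFS =====

-- one lockstep triple of the stream: key, vowel, key, spacer (indices cycle by mod)
def chunkC (kcs : List (List Char)) (i : Nat) : List Char :=
  let k := kcs.getD (i % kcs.length) []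
  k ++ [['a','e','i','o','u'].getD (i % 5) ' '] ++ k ++ [[' '], [' '], [' ',' ']].getD (i % 3) []

-- the first m triples of the infinite stream, concatenated
def FF (kcs : List (List Char)) (m : Nat) : List Char :=
  ((List.range m).map (chunkC kcs)).flatten

theorem FF_succ (kcs : List (List Char)) (m : Nat) :
    FF kcs (m+1) = FF kcs m ++ chunkC kcs m := by
  simp [FF, List.range_succ]

theorem chunk_len_ge (kcs : List (List Char)) (i : Nat) : 2 ≤ (chunkC kcs i).length := by
  have h3 : i % 3 < 3 := Nat.mod_lt _ (by omega)
  simp only [chunkC, List.length_append, List.length_cons]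
  interval_cases h : i % 3 <;> simp <;> omega

theorem FF_len_ge (kcs : List (List Char)) (m : Nat) : 2 * m ≤ (FF kcs m).length := by
  induction m with
  | zero => simp [FF]
  | succ m ih =>
    have := chunk_len_ge kcs m
    rw [FF_succ]
    simp only [List.length_append]
    omega

theorem FF_add (kcs : List (List Char)) (a d : Nat) :
    FF kcs (a + d) = FF kcs a ++ ((List.range d).map (fun i => chunkC kcs (a + i))).flatten := by
  simp [FF, List.range_add, Function.comp_def]

theorem FF_prefix_take (kcs : List (List Char)) (m M L : Nat) (hm : m ≤ M)
    (hL : L ≤ (FF kcs m).length) : (FF kcs M).take L = (FF kcs m).take L := by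
  obtain ⟨d, rfl⟩ := Nat.exists_eq_add_of_le hm
  rw [FF_add, List.take_append_of_le_length hL]

theorem chunk_periodic (kcs : List (List Char)) (a i : Nat)
    (h1 : kcs.length ∣ a) (h2 : 5 ∣ a) (h3 : 3 ∣ a) :
    chunkC kcs (a + i) = chunkC kcs i := by
  obtain ⟨t1, rfl⟩ := h1
  have e1 : (kcs.length * t1 + i) % kcs.length = i % kcs.length := Nat.mul_add_mod _ _ _
  obtain ⟨t2, h2⟩ := h2
  obtain ⟨t3, h3⟩ := h3
  have e2 : (kcs.length * t1 + i) % 5 = i % 5 := by rw [h2]; exact Nat.mul_add_mod _ _ _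
  have e3 : (kcs.length * t1 + i) % 3 = i % 3 := by rw [h3]; exact Nat.mul_add_mod _ _ _
  simp only [chunkC, e1, e2, e3]

theorem FF_period_add (kcs : List (List Char)) (a p : Nat)
    (h1 : kcs.length ∣ a) (h2 : 5 ∣ a) (h3 : 3 ∣ a) :
    FF kcs (a + p) = FF kcs a ++ FF kcs p := by
  rw [FF_add]
  congr 1
  simp only [FF]
  congr 1
  exact List.map_congr_left (fun i _ => chunk_periodic kcs a i h1 h2 h3)

theorem flatten_replicate_FF (kcs : List (List Char)) (r : Nat) :
    List.flatten (List.replicate r (FF kcs (15 * kcs.length)))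
      = FF kcs (r * (15 * kcs.length)) := by
  induction r with
  | zero => simp [FF]
  | succ r ih =>
    rw [List.replicate_succ', List.flatten_append, ih]
    have h1 : kcs.length ∣ r * (15 * kcs.length) := ⟨r * 15, by ring⟩
    have h2 : 5 ∣ r * (15 * kcs.length) := ⟨r * 3 * kcs.length, by ring⟩
    have h3 : 3 ∣ r * (15 * kcs.length) := ⟨r * 5 * kcs.length, by ring⟩
    rw [show (r+1) * (15 * kcs.length) = r * (15 * kcs.length) + 15 * kcs.length by ring,
        FF_period_add kcs _ _ h1 h2 h3]
    simp

theorem take_FF_eq (kcs : List (List Char)) (L m1 m2 : Nat)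
    (h1 : L ≤ (FF kcs m1).length) (h2 : L ≤ (FF kcs m2).length) :
    (FF kcs m1).take L = (FF kcs m2).take L :=
  (FF_prefix_take kcs m1 (max m1 m2) L (le_max_left _ _) h1).symm.trans
    (FF_prefix_take kcs m2 (max m1 m2) L (le_max_right _ _) h2)

-- B's bounded builder, started in lockstep on the stream prefix, returns a stream prefix
-- FF j (with its length as the running total), j ≤ p, stopping at p or once length is covered
theorem buildB_spec (kcs : List (List Char)) (length : Int) (p : Nat) :
    ∀ (n i : Nat) (acc : List Char) (total : Int), p - i ≤ n → acc = FF kcs i → i ≤ p →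
    total = (acc.length : Int) →
    ∃ j, j ≤ p ∧ synthBuildB kcs length p i total acc = (FF kcs j, ((FF kcs j).length : Int))
         ∧ (j = p ∨ length ≤ ((FF kcs j).length : Int)) := by
  intro n
  induction n with
  | zero =>
    intro i acc total hn hacc hip htot
    have hip' : i = p := by omega
    refine ⟨i, by omega, ?_, Or.inl hip'⟩
    rw [synthBuildB, if_neg (by omega), hacc, htot, hacc]
  | succ n ih =>
    intro i acc total hn hacc hip htot
    by_cases hc : i < p ∧ total < length
    · rw [synthBuildB, if_pos hc]
      have hstep : acc ++ (kcs.getD (i % kcs.length) [] ++ [['a','e','i','o','u'].getD (i % 5) ' '] ++ kcs.getD (i % kcs.length) [] ++ [[' '], [' '], [' ',' ']].getD (i % 3) []) = FF kcs (i+1) := by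
        rw [FF_succ, ← hacc]
        simp [chunkC]
      obtain ⟨j, hjp, hres, hcase⟩ := ih (i+1)
        (acc ++ (kcs.getD (i % kcs.length) [] ++ [['a','e','i','o','u'].getD (i % 5) ' '] ++ kcs.getD (i % kcs.length) [] ++ [[' '], [' '], [' ',' ']].getD (i % 3) []))
        (total + ((kcs.getD (i % kcs.length) [] ++ [['a','e','i','o','u'].getD (i % 5) ' '] ++ kcs.getD (i % kcs.length) [] ++ [[' '], [' '], [' ',' ']].getD (i % 3) []).length : Int))
        (by omega) hstep (by omega) (by rw [htot]; simp)
      exact ⟨j, hjp, by rw [← hres], hcase⟩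
    · rw [synthBuildB, if_neg hc]
      refine ⟨i, hip, by rw [hacc, htot, hacc], ?_⟩
      rcases Nat.lt_or_ge i p with h | h
      · right; rw [← hacc, ← htot]; omega
      · left; omega

-- A's loop, started in lockstep on the stream prefix, returns a longer stream prefix of length ≥ `length`
theorem loopA_spec (kcs : List (List Char)) (length : Int) :
    ∀ (n : Nat) (acc : List Char) (i : Nat), ((length - acc.length).toNat ≤ n) → acc = FF kcs i →
    ∃ m, synthLoopA kcs ['a','e','i','o','u'] [[' '], [' '], [' ',' ']] length acc i i i = FF kcs m
         ∧ length ≤ ((FF kcs m).length : Int) := by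
  intro n
  induction n with
  | zero =>
    intro acc i hn hacc
    refine ⟨i, ?_, ?_⟩
    · rw [synthLoopA, if_neg (by omega), hacc]
    · rw [← hacc]; omega
  | succ n ih =>
    intro acc i hn hacc
    by_cases h : (acc.length : Int) < length
    · rw [synthLoopA, if_pos h]
      simp only [List.length_cons, List.length_nil]
      have hck := chunk_len_ge kcs i
      have hstep : acc ++ (kcs.getD (i % kcs.length) [] ++ [['a','e','i','o','u'].getD (i % 5) ' '] ++ kcs.getD (i % kcs.length) []) ++ [[' '], [' '], [' ',' ']].getD (i % 3) [] = FF kcs (i+1) := by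
        rw [FF_succ, ← hacc]
        simp [chunkC]
      have hlen : (acc ++ (kcs.getD (i % kcs.length) [] ++ [['a','e','i','o','u'].getD (i % 5) ' '] ++ kcs.getD (i % kcs.length) []) ++ [[' '], [' '], [' ',' ']].getD (i % 3) []).length = acc.length + (chunkC kcs i).length := by
        simp only [chunkC, List.length_append, List.length_cons, List.length_nil]
        omega
      rw [hstep]
      apply ih
      · rw [← hstep, hlen]
        omega
      · rfl
    · exact ⟨i, by rw [synthLoopA, if_neg h, hacc], by rw [← hacc]; omega⟩

-- ===== VERDICT (by name: the statement is the Claim_ definition above) =====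
theorem synthesize_drill_text_spec : Claim_equal_synthesize_drill_text := by
  intro error_keys length _dom
  unfold Spec_synthesize_drill_text
  simp only [synthesize_drill_text, synthesize_drill_text_alt]
  by_cases hk : error_keys.filter (fun k => PySem.Chars.strip k.toList ≠ []) = []
  · rw [if_pos hk, if_pos hk]
  · rw [if_neg hk, if_neg hk]
    set kcs := (error_keys.filter (fun k => PySem.Chars.strip k.toList ≠ [])).map String.toList with hkcs
    have hkn : 0 < kcs.length := by
      rw [hkcs, List.length_map]
      exact List.length_pos_of_ne_nil hk
    by_cases hL : length ≤ 0
    · rw [if_pos hL, synthLoopA, if_neg (by simp; omega)]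
      simp [PySem.List.slice, PySem.List.clampIdx, PySem.Chars.strip, PySem.Chars.lstrip, PySem.Chars.rstrip]
    · rw [if_neg hL]
      replace hL : 0 < length := by omega
      obtain ⟨m, hm, hmlen⟩ := loopA_spec kcs length (length.toNat) [] 0 (by simp) (by simp [FF])
      obtain ⟨j, hjp, hbuild, hjcase⟩ := buildB_spec kcs length (15 * kcs.length)
        (15 * kcs.length) 0 [] 0 (by omega) (by simp [FF]) (by omega) (by simp)
      rw [hm, hbuild]
      have hLm : length.toNat ≤ (FF kcs m).length := by omega
      by_cases ht : length ≤ ((FF kcs j).length : Int)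
      · rw [if_pos ht, PySem.List.slice_to _ (by omega : (0:Int) ≤ length),
            PySem.List.slice_to _ (by omega : (0:Int) ≤ length),
            take_FF_eq kcs length.toNat m j hLm (by omega)]
      · rw [if_neg ht]
        have hjp' : j = 15 * kcs.length := by tauto
        subst hjp'
        have hplen : 30 ≤ (FF kcs (15 * kcs.length)).length := by
          have := FF_len_ge kcs (15 * kcs.length)
          omega
        have hplen' : (0:Int) < ((FF kcs (15 * kcs.length)).length : Int) := by exact_mod_cast by omega
        set R := (PySem.Int.floordiv length ((FF kcs (15 * kcs.length)).length : Int)).toNat + 1 with hR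
        have hq : 0 ≤ PySem.Int.floordiv length ((FF kcs (15 * kcs.length)).length : Int) := by
          rw [PySem.Int.floordiv_eq_ediv_of_pos hplen']
          exact Int.ediv_nonneg (by omega) (by omega)
        have hRge : length ≤ (R : Int) * ((FF kcs (15 * kcs.length)).length : Int) := by
          rw [hR]
          push_cast [Int.toNat_of_nonneg hq]
          rw [PySem.Int.floordiv_eq_ediv_of_pos hplen']
          have h1 := Int.mul_ediv_add_emod length ((FF kcs (15 * kcs.length)).length : Int)
          have h2 := Int.emod_lt_of_pos length hplen'
          nlinarith
        have hFlen : (FF kcs (R * (15 * kcs.length))).length = R * (FF kcs (15 * kcs.length)).length := by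
          rw [← flatten_replicate_FF]
          simp [List.length_flatten, List.map_replicate, List.sum_replicate, smul_eq_mul]
        have hLR : length.toNat ≤ (FF kcs (R * (15 * kcs.length))).length := by
          rw [hFlen]
          have : (length.toNat : Int) ≤ (R : Int) * ((FF kcs (15 * kcs.length)).length : Int) := by
            rw [Int.toNat_of_nonneg (by omega)]; exact hRge
          exact_mod_cast this
        rw [flatten_replicate_FF, PySem.List.slice_to _ (by omega : (0:Int) ≤ length),
            PySem.List.slice_to _ (by omega : (0:Int) ≤ length),
            take_FF_eq kcs length.toNat m (R * (15 * kcs.length)) hLm hLR]
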